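-- pv_equiv track=rewrite | github.com/FriedbergLab/GOThresher | gothresher/gothresher.py | find_frequency
-- ===== SOURCE A (Python) =====
-- def find_frequency(annotations, Prot_to_GO_Map):
--     count = 0
--     if annotations == None:
--         return 0
--     for prot in Prot_to_GO_Map:
--         if set(annotations).issubset(set(Prot_to_GO_Map[prot])):
--             count += 1
--     return count
-- ===== SOURCE B (Python) =====
-- def find_frequency(annotations, Prot_to_GO_Map):
--     if annotations is None:
--         return 0
--     result = set(Prot_to_GO_Map)
--     for ann in annotations:
--         result &= {p for p in Prot_to_GO_Map if ann in Prot_to_GO_Map[p]}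
--     return len(result)
-- ===== Notes on version B (the rewrite author's own statement) =====
-- stated objective: alternative
-- what changed: Traversal reversed from protein-major subset tests to annotation-major intersection of a shrinking candidate set of proteins.
import Mathlib
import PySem

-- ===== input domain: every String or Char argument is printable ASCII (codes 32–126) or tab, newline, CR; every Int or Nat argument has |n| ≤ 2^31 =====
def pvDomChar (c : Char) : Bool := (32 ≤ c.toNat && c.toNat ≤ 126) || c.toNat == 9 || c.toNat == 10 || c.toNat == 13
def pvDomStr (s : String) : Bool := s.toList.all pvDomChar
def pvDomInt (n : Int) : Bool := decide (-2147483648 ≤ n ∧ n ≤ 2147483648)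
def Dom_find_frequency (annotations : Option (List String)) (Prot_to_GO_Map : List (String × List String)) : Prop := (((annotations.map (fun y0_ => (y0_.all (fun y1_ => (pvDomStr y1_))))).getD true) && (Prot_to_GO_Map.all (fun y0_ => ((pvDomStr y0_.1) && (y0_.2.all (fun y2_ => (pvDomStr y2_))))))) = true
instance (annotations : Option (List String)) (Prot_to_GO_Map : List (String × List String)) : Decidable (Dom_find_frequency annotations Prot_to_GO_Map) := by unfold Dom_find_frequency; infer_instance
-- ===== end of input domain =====

-- B reverses the traversal: annotation-major intersection of a shrinking candidate set of
-- proteins, instead of A's protein-major subset test (alternative decomposition, same cost class).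

-- ===== PORT A =====
-- literal port of A: for each key of the dict, test set(annotations) ⊆ set(dict[prot])
def find_frequency (annotations : Option (List String)) (Prot_to_GO_Map : List (String × List String)) : Int :=
  match annotations with
  | none => 0
  | some anns =>
      let d := PySem.Dict.ofList Prot_to_GO_Map
      d.keys.foldl (fun count prot =>
        if PySem.Set.issubset (PySem.Set.ofList anns) (PySem.Set.ofList (d.getD prot []))
        then count + 1 else count) 0

-- ===== PORT B =====
-- literal port of Source B: result = set(keys); for ann: result &= {p | ann in d[p]}; return len(result)
def find_frequency_alt (annotations : Option (List String)) (Prot_to_GO_Map : List (String × List String)) : Int :=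
  match annotations with
  | none => 0
  | some anns =>
      let d := PySem.Dict.ofList Prot_to_GO_Map
      let result : PySem.Set String := PySem.Set.ofList d.keys
      ((anns.foldl (fun r ann =>
          PySem.Set.inter r (PySem.Set.ofList (d.keys.filter (fun p => (d.getD p []).contains ann)))) result).length : Int)

-- ===== PRECONDITION & SPEC =====
def Spec_find_frequency (annotations : Option (List String)) (Prot_to_GO_Map : List (String × List String)) (out : Int) : Prop := out = find_frequency_alt annotations Prot_to_GO_Map
instance (annotations : Option (List String)) (Prot_to_GO_Map : List (String × List String)) (out : Int) : Decidable (Spec_find_frequency annotations Prot_to_GO_Map out) := by unfold Spec_find_frequency; infer_instance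

-- ===== CLAIM (what is proved, stated in full; the proofs are below) =====
def Claim_equal_find_frequency : Prop := ∀ (annotations : Option (List String)) (Prot_to_GO_Map : List (String × List String)), Dom_find_frequency annotations Prot_to_GO_Map → Spec_find_frequency annotations Prot_to_GO_Map (find_frequency annotations Prot_to_GO_Map)

-- ===== LEMMAS AND PROOFS =====

-- `all` over set(xs) equals `all` over xs (same members)
theorem all_ofList {α : Type} [BEq α] [LawfulBEq α] (xs : List α) (f : α → Bool) :
    (PySem.Set.ofList xs).all f = xs.all f := by
  apply Bool.eq_iff_iff.mpr
  simp [List.all_eq_true, PySem.Set.mem_ofList]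

-- `contains` on set(xs) equals `contains` on xs
theorem contains_ofList {α : Type} [BEq α] [LawfulBEq α] (xs : List α) (x : α) :
    (PySem.Set.ofList xs).contains x = xs.contains x := by
  apply Bool.eq_iff_iff.mpr
  simp [PySem.Set.mem_ofList]

-- set(xs) of a duplicate-free list is the list itself
theorem foldl_add_eq_append {α : Type} [BEq α] [LawfulBEq α] (xs s : List α)
    (h : (s ++ xs).Nodup) : xs.foldl PySem.Set.add s = s ++ xs := by
  induction xs generalizing s with
  | nil => simp
  | cons x t ih =>
      have hx : PySem.Set.contains s x = false := by
        simp only [PySem.Set.contains, List.contains_eq_mem, decide_eq_false_iff_not]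
        intro hxs
        exact List.disjoint_of_nodup_append h hxs (by simp)
      rw [List.foldl_cons]
      show t.foldl PySem.Set.add (PySem.Set.add s x) = s ++ x :: t
      rw [PySem.Set.add, hx]
      simp only [Bool.false_eq_true, if_false]
      rw [List.append_cons] at h
      simpa using ih (s ++ [x]) h

theorem ofList_eq_self {α : Type} [BEq α] [LawfulBEq α] (xs : List α) (h : xs.Nodup) :
    PySem.Set.ofList xs = xs := by
  rw [PySem.Set.ofList_eq_foldl]
  exact foldl_add_eq_append xs [] (by simpa using h)

-- the annotation-major intersection loop is one filter by the conjunction of all tests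
theorem foldl_inter_filter (d : PySem.Dict String (List String)) (anns : List String)
    (r : List String) (hr : ∀ p ∈ r, p ∈ d.keys) :
    anns.foldl (fun r ann =>
        PySem.Set.inter r (PySem.Set.ofList (d.keys.filter (fun p => (d.getD p []).contains ann)))) r
      = r.filter (fun p => anns.all (fun a => (d.getD p []).contains a)) := by
  induction anns generalizing r with
  | nil => simp
  | cons a anns ih =>
      rw [List.foldl_cons]
      have hstep : PySem.Set.inter r
          (PySem.Set.ofList (d.keys.filter (fun p => (d.getD p []).contains a)))
          = r.filter (fun p => (d.getD p []).contains a) := by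
        unfold PySem.Set.inter
        apply List.filter_congr
        intro p hp
        rw [contains_ofList]
        simp only [List.contains_eq_mem, List.mem_filter, decide_eq_decide]
        have := hr p hp
        simp_all
      rw [hstep, ih _ (fun p hp => hr p (List.mem_of_mem_filter hp)), List.filter_filter]
      simp [Bool.and_comm]

-- ===== VERDICT (by name: the statement is the Claim_ definition above) =====
theorem find_frequency_spec : Claim_equal_find_frequency := by
  intro annotations m _
  unfold Spec_find_frequency find_frequency find_frequency_alt
  cases annotations with
  | none => rfl
  | some anns =>
      simp only
      rw [PySem.List.foldl_count_if, foldl_inter_filter _ _ _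
            (fun p hp => (PySem.Set.mem_ofList _ _).mp hp),
          ofList_eq_self _ (PySem.Dict.nodup_keys_ofList _), ← List.countP_eq_length_filter]
      simp only [zero_add]
      congr 1
      apply List.countP_congr
      intro p _
      unfold PySem.Set.issubset
      rw [all_ofList]
      simp only [List.all_eq_true, contains_ofList]
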